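-- pv_equiv track=rewrite | github.com/marshy2346/quickgrader | utils/parsing.py | get_uin
-- ===== SOURCE A (Python) =====
-- def get_uin(filename):
--     """
--     Very naive implementation to get the uin from the filename
--
--     :param filename: the student file
--     :return: the uin
--     """
--     uin = ""
--     n = 0
--     skip = True
--     for c in filename:
--         if n == 4:
--             break
--         if c.isdigit():
--             if skip:
--                 skip = False
--             else:
--                 uin += c
--                 n += 1
--     if uin == "":
--         return filename
--     else:
--         return uin
-- ===== SOURCE B (Python) =====
-- def _take_digits(s, k):
--     # collect up to k digit characters: skip the non-digit prefix, take one
--     # digit, recurse on the rest with k-1 (recursion depth is at most k)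
--     if k == 0:
--         return ""
--     while s and not s[0].isdigit():
--         s = s[1:]
--     if not s:
--         return ""
--     return s[0] + _take_digits(s[1:], k - 1)
--
-- def get_uin(filename):
--     # advance to the first digit, discard it, then take the next four digits
--     rest = filename
--     while rest and not rest[0].isdigit():
--         rest = rest[1:]
--     uin = _take_digits(rest[1:], 4)
--     return uin if uin else filename
-- ===== Notes on version B (the rewrite author's own statement) =====
-- stated objective: alternative
-- what changed: B decomposes the task into drop-to-first-digit, discard it, then a recursion on the digit count (skip non-digit prefix, take one digit, recurse with k-1, at most 4 levels), instead of A's single loop carrying skip-flag and counter state with an early break.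
import Mathlib
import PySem

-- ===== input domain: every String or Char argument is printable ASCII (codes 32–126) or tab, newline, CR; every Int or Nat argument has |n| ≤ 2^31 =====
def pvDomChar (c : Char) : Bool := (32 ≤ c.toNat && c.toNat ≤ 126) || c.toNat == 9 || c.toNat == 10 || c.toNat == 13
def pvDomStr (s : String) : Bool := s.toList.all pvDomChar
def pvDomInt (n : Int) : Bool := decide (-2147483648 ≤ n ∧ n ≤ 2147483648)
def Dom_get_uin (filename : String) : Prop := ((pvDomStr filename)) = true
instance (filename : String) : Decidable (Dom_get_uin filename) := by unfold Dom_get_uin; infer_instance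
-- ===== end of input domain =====

-- B replaces A's skip-flag/counter/early-break loop by drop-to-first-digit + a recursion on the digit count; objective: alternative.

-- ===== PORT A =====
-- the loop over filename's characters with state (uin, n, skip); 'break' when n == 4
def get_uin_go : List Char → List Char → Int → Bool → List Char
  | [], uin, _, _ => uin
  | c :: cs, uin, n, skip =>
    if n == 4 then uin
    else if PySem.Chars.isdigit c then
      if skip then get_uin_go cs uin n false
      else get_uin_go cs (uin ++ [c]) (n + 1) skip
    else get_uin_go cs uin n skip

def get_uin (filename : String) : String :=
  let uin := get_uin_go filename.toList [] 0 true
  if uin = [] then filename else String.ofList uin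

-- ===== PORT B =====
-- the 'while rest and not rest[0].isdigit(): rest = rest[1:]' loop (used in
-- get_uin and inside _take_digits, where the same loop skips the non-digit prefix)
def dropNonDigit : List Char → List Char
  | [] => []
  | c :: cs => if PySem.Chars.isdigit c then c :: cs else dropNonDigit cs

-- needed by takeDigits for termination
lemma dropNonDigit_length_le (s : List Char) : (dropNonDigit s).length ≤ s.length := by
  induction s with
  | nil => simp [dropNonDigit]
  | cons c cs ih =>
    by_cases hd : PySem.Chars.isdigit c
    · simp [dropNonDigit, hd]
    · rw [dropNonDigit, if_neg (by simpa using hd)]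
      simpa using Nat.le_succ_of_le ih

-- _take_digits(s, k): skip non-digits, take one digit, recurse with k - 1
def takeDigits (s : List Char) (k : Int) : List Char :=
  if k == 0 then []
  else
    match h : dropNonDigit s with
    | [] => []
    | c :: cs => c :: takeDigits cs (k - 1)
termination_by s.length
decreasing_by
  have := dropNonDigit_length_le s
  rw [h] at this
  simp at this
  omega

def get_uin_alt (filename : String) : String :=
  let rest := dropNonDigit filename.toList
  let uin := takeDigits (rest.drop 1) 4   -- rest[1:] : exact, the start index 1 is nonnegative
  if uin = [] then filename else String.ofList uin

-- ===== PRECONDITION & SPEC =====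
def Spec_get_uin (filename : String) (out : String) : Prop := out = get_uin_alt filename
instance (filename : String) (out : String) : Decidable (Spec_get_uin filename out) := by unfold Spec_get_uin; infer_instance

-- ===== CLAIM (what is proved, stated in full; the proofs are below) =====
def Claim_equal_get_uin : Prop := ∀ (filename : String), Dom_get_uin filename → Spec_get_uin filename (get_uin filename)

-- ===== LEMMAS AND PROOFS =====

-- A's loop after the first digit was skipped appends the next (4 - n) digits
lemma get_uin_go_false (cs : List Char) : ∀ (uin : List Char) (n : Int),
    0 ≤ n → n ≤ 4 → uin.length = n.toNat →
    get_uin_go cs uin n false = uin ++ (cs.filter PySem.Chars.isdigit).take (4 - n.toNat) := by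
  induction cs with
  | nil => intro uin n _ _ _; simp [get_uin_go]
  | cons c cs ih =>
    intro uin n h0 h4 hlen
    by_cases hn : n = 4
    · subst hn; simp [get_uin_go]
    · have hlt : n < 4 := lt_of_le_of_ne h4 hn
      by_cases hd : PySem.Chars.isdigit c
      · rw [get_uin_go, if_neg (by simpa using hn), if_pos hd, if_neg (by simp),
          ih (uin ++ [c]) (n + 1) (by omega) (by omega) (by simp [hlen]; omega)]
        have : (4 - n.toNat) = (4 - (n + 1).toNat) + 1 := by omega
        simp [hd, this, List.append_assoc]
      · rw [get_uin_go, if_neg (by simpa using hn), if_neg (by simpa using hd),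
          ih uin n h0 h4 hlen]
        simp [hd]

-- A's whole loop: skip the first digit, take the next four
lemma get_uin_go_true (cs : List Char) :
    get_uin_go cs [] 0 true = ((cs.filter PySem.Chars.isdigit).drop 1).take 4 := by
  induction cs with
  | nil => simp [get_uin_go]
  | cons c cs ih =>
    by_cases hd : PySem.Chars.isdigit c
    · rw [get_uin_go, if_neg (by simp), if_pos hd, if_pos rfl,
        get_uin_go_false cs [] 0 (by omega) (by omega) (by simp)]
      simp [hd]
    · rw [get_uin_go, if_neg (by simp), if_neg (by simpa using hd), ih]
      simp [hd]

-- dropNonDigit keeps exactly the digit characters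
lemma filter_dropNonDigit (cs : List Char) :
    (dropNonDigit cs).filter PySem.Chars.isdigit = cs.filter PySem.Chars.isdigit := by
  induction cs with
  | nil => simp [dropNonDigit]
  | cons c cs ih =>
    by_cases hd : PySem.Chars.isdigit c
    · rw [dropNonDigit, if_pos hd]
    · rw [dropNonDigit, if_neg (by simpa using hd), ih,
        List.filter_cons_of_neg (by simpa using hd)]

-- a nonempty dropNonDigit result starts with a digit
lemma dropNonDigit_head (cs : List Char) (c : Char) (rest : List Char)
    (h : dropNonDigit cs = c :: rest) : PySem.Chars.isdigit c = true := by
  induction cs with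
  | nil => simp [dropNonDigit] at h
  | cons c' cs ih =>
    by_cases hd : PySem.Chars.isdigit c'
    · rw [dropNonDigit, if_pos hd] at h
      cases h; exact hd
    · rw [dropNonDigit, if_neg (by simpa using hd)] at h
      exact ih h

-- takeDigits is a bounded filter
lemma takeDigits_eq (s : List Char) (k : Int) (hk : 0 ≤ k) :
    takeDigits s k = (s.filter PySem.Chars.isdigit).take k.toNat := by
  induction s, k using takeDigits.induct with
  | case1 s k h0 =>
    rw [takeDigits, if_pos h0]
    have : k = 0 := by simpa using h0
    simp [this]
  | case2 s k h0 h =>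
    rw [takeDigits, if_neg h0, h]
    rw [← filter_dropNonDigit s, h]
    simp
  | case3 s k h0 c cs h ih =>
    rw [takeDigits, if_neg h0, h]
    have hd : PySem.Chars.isdigit c = true := dropNonDigit_head s c cs h
    rw [← filter_dropNonDigit s, h, List.filter_cons_of_pos hd]
    have hk0 : k ≠ 0 := by simpa using h0
    have hkn : k.toNat = (k - 1).toNat + 1 := by omega
    rw [hkn, List.take_succ_cons]
    show c :: takeDigits cs (k - 1) = c :: List.take (k - 1).toNat (List.filter PySem.Chars.isdigit cs)
    rw [ih (by omega)]

-- dropping the head of dropNonDigit, filtered, is the tail of the filtered list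
lemma filter_dropNonDigit_tail (cs : List Char) :
    ((dropNonDigit cs).drop 1).filter PySem.Chars.isdigit = (cs.filter PySem.Chars.isdigit).drop 1 := by
  cases h : dropNonDigit cs with
  | nil =>
    have hfil : cs.filter PySem.Chars.isdigit = [] := by
      rw [← filter_dropNonDigit cs, h, List.filter_nil]
    rw [hfil]
    simp
  | cons c rest =>
    have hd := dropNonDigit_head cs c rest h
    have hfil : cs.filter PySem.Chars.isdigit = c :: rest.filter PySem.Chars.isdigit := by
      rw [← filter_dropNonDigit cs, h, List.filter_cons_of_pos hd]
    rw [hfil]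
    simp

-- ===== VERDICT (by name: the statement is the Claim_ definition above) =====
theorem get_uin_spec : Claim_equal_get_uin := by
  intro filename _
  unfold Spec_get_uin get_uin get_uin_alt
  simp only [get_uin_go_true, takeDigits_eq _ 4 (by omega), filter_dropNonDigit_tail]
  have h4 : (4 : Int).toNat = 4 := rfl
  rw [h4]
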